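-- pv_equiv track=rewrite | github.com/aolige/Python_SelfLearning | Day4-Python-Function/Python03函数返回值.py | CalComputer
-- ===== SOURCE A (Python) =====
-- def CalComputer(sum):
--     listA = []
--     result = 0
--     i = 1
--     while i <= sum:
--         result += i
--         i += 1
--         listA.append(result)
--         pass
--     return listA  # 返回值的类型由return决定
--     pass
-- ===== SOURCE B (Python) =====
-- def CalComputer(sum):
--     n = sum if sum > 0 else 0
--     return [k * (k + 1) // 2 for k in range(1, n + 1)]
-- ===== Notes on version B (the rewrite author's own statement) =====
-- stated objective: simpler
-- what changed: Replaces the while loop with a running-sum accumulator by a list comprehension over range(1, n+1) that computes each triangular number independently with the closed form k*(k+1)//2.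
import Mathlib
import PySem

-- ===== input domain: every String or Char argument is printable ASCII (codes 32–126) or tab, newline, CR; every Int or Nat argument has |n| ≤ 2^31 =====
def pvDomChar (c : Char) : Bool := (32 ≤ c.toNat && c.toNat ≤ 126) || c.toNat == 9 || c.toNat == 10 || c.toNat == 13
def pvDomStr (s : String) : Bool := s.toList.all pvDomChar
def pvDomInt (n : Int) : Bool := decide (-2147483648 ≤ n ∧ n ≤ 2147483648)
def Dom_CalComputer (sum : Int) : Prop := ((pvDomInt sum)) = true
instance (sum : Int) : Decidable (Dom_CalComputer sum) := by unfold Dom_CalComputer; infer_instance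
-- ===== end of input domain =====

-- B replaces the accumulator while-loop by a comprehension over range(1, n+1) using the closed-form triangular number; objective: simpler.

-- ===== PORT A =====
-- while i <= sum: result += i; i += 1; listA.append(result)
def CalComputerLoopA (sum result i : Int) (listA : List Int) : List Int :=
  if i ≤ sum then
    CalComputerLoopA sum (result + i) (i + 1) (listA ++ [result + i])
  else listA
termination_by (sum + 1 - i).toNat
decreasing_by omega

def CalComputer (sum : Int) : List Int :=
  CalComputerLoopA sum 0 1 []

-- ===== PORT B =====
-- n = sum if sum > 0 else 0; [k*(k+1)//2 for k in range(1, n+1)]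
def CalComputer_alt (sum : Int) : List Int :=
  let n : Int := if sum > 0 then sum else 0
  (PySem.List.pyRange 1 (n + 1) 1).map (fun k => PySem.Int.floordiv (k * (k + 1)) 2)

-- ===== PRECONDITION & SPEC =====
def Spec_CalComputer (sum : Int) (out : List Int) : Prop := out = CalComputer_alt sum
instance (sum : Int) (out : List Int) : Decidable (Spec_CalComputer sum out) := by unfold Spec_CalComputer; infer_instance

-- ===== CLAIM (what is proved, stated in full; the proofs are below) =====
def Claim_equal_CalComputer : Prop := ∀ (sum : Int), Dom_CalComputer sum → Spec_CalComputer sum (CalComputer sum)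

-- ===== LEMMAS AND PROOFS =====
theorem loopA_eq_map (sum result i : Int) (listA : List Int)
    (h : 2 * result = i * (i - 1)) :
    CalComputerLoopA sum result i listA =
      listA ++ (PySem.List.pyRange i (sum + 1) 1).map
        (fun k => PySem.Int.floordiv (k * (k + 1)) 2) := by
  unfold CalComputerLoopA
  split
  · rename_i hle
    have h2 : 2 * (result + i) = (i + 1) * (i + 1 - 1) := by ring_nf; ring_nf at h; omega
    rw [loopA_eq_map sum (result + i) (i + 1) _ h2,
        PySem.List.pyRange_one_cons (by omega : i < sum + 1)]
    have hfd : PySem.Int.floordiv (i * (i + 1)) 2 = result + i := by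
      have he : i * (i + 1) = (result + i) * 2 := by ring_nf; ring_nf at h2 ⊢; omega
      rw [he, PySem.Int.floordiv]
      exact Int.mul_fdiv_cancel _ (by norm_num)
    rw [List.map_cons, hfd]
    simp only [List.append_assoc, List.singleton_append]
  · rename_i hgt
    rw [PySem.List.pyRange_one_eq_nil (by omega)]
    simp
termination_by (sum + 1 - i).toNat
decreasing_by omega

-- ===== VERDICT (by name: the statement is the Claim_ definition above) =====
theorem CalComputer_spec : Claim_equal_CalComputer := by
  intro sum _
  unfold Spec_CalComputer CalComputer CalComputer_alt
  rw [loopA_eq_map sum 0 1 [] (by ring)]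
  by_cases hs : sum > 0
  · simp [hs]
  · simp only [hs]
    rw [PySem.List.pyRange_one_eq_nil (by omega),
        PySem.List.pyRange_one_eq_nil (by omega)]
    simp
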